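-- pv_equiv track=rewrite | github.com/isharoverwhite/E-Connect | server/app/services/builder.py | _looks_like_docker_bridge_ip
-- ===== SOURCE A (Python) =====
-- import ipaddress
--
-- _COMMON_DOCKER_BRIDGE_SUBNETS = tuple(
--     ipaddress.ip_network(cidr)
--     for cidr in (
--         "172.17.0.0/16",
--         "172.18.0.0/16",
--         "172.19.0.0/16",
--         "172.20.0.0/16",
--         "172.21.0.0/16",
--         "172.22.0.0/16",
--         "172.23.0.0/16",
--         "172.24.0.0/16",
--         "172.25.0.0/16",
--         "172.26.0.0/16",
--         "172.27.0.0/16",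
--         "172.28.0.0/16",
--         "172.29.0.0/16",
--         "172.30.0.0/16",
--         "172.31.0.0/16",
--         "192.168.65.0/24",
--     )
-- )
--
-- def _looks_like_docker_bridge_ip(hostname: str) -> bool:
--     try:
--         parsed = ipaddress.ip_address(hostname)
--     except ValueError:
--         return False
--
--     if not isinstance(parsed, ipaddress.IPv4Address):
--         return False
--
--     return any(parsed in subnet for subnet in _COMMON_DOCKER_BRIDGE_SUBNETS)
-- ===== SOURCE B (Python) =====
-- def _octet(part):
--     """Value of one dotted-quad octet, dispatched by length; None if invalid."""
--     k = len(part)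
--     if k == 1:
--         return int(part) if part.isascii() and part.isdigit() else None
--     if k == 2:
--         return int(part) if part.isascii() and part.isdigit() and part[0] != "0" else None
--     if k == 3:
--         if part.isascii() and part.isdigit() and part[0] != "0":
--             n = int(part)
--             return n if n <= 255 else None
--         return None
--     return None
--
--
-- def _looks_like_docker_bridge_ip(hostname: str) -> bool:
--     parts = hostname.split(".")
--     if len(parts) != 4:
--         return False
--     a, b, c, d = (_octet(p) for p in parts)
--     if a is None or b is None or c is None or d is None:
--         return False
--     return (a == 172 and 17 <= b <= 31) or (a == 192 and b == 168 and c == 65)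
-- ===== Notes on version B (the rewrite author's own statement) =====
-- stated objective: faster
-- what changed: Replaced the ipaddress object parse plus any-loop over 16 prebuilt ip_network objects with a hand-rolled dotted-quad split whose octets are validated by a length-dispatched table, deciding membership directly on the octet values (a==172 and 17<=b<=31, or (a,b,c)==(192,168,65)) with no network objects and no loop over subnets.
import Mathlib
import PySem

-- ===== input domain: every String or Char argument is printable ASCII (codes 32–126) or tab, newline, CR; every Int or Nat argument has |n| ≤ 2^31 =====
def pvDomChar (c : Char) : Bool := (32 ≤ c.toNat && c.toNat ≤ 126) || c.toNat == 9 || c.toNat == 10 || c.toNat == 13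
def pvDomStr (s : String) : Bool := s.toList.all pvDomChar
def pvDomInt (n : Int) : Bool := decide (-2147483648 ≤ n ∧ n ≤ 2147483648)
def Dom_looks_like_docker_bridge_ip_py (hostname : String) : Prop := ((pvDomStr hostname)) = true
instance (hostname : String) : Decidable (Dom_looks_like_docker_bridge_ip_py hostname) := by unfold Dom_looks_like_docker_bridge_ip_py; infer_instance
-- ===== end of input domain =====

-- B drops the ipaddress-object parse and the any-loop over 16 prebuilt subnets: it
-- validates each dotted-quad octet by a length-dispatched table and decides membership
-- directly on the octets (objective: faster by a constant factor).


-- ===== PORT A =====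
-- Exact model of ipaddress.ip_address(hostname) restricted to the IPv4 outcome
-- (an IPv6 parse and a ValueError both lead to A returning False, so both are none):
-- one octet is 1–3 ASCII digits, no leading zero, value ≤ 255.
def pvDig (c : Char) : Bool := decide (48 ≤ c.toNat ∧ c.toNat ≤ 57)

def pvOctet? (cs : List Char) : Option Int :=
  if cs.length = 0 ∨ 3 < cs.length then none
  else if ¬ cs.all pvDig then none
  else if 1 < cs.length ∧ cs.headD '0' = '0' then none
  else
    let v : Int := cs.foldl (fun a c => a * 10 + ((c.toNat : Int) - 48)) 0
    if v ≤ 255 then some v else none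

def pvParseIPv4? (s : String) : Option Int :=
  match (s.toList.splitOn '.').map pvOctet? with
  | [some a, some b, some c, some d] => some (a * 16777216 + b * 65536 + c * 256 + d)
  | _ => none

-- the 16 subnets of _COMMON_DOCKER_BRIDGE_SUBNETS as (network address, broadcast address)
def pvDockerSubnets : List (Int × Int) :=
  [(0xAC110000, 0xAC11FFFF), (0xAC120000, 0xAC12FFFF), (0xAC130000, 0xAC13FFFF),
   (0xAC140000, 0xAC14FFFF), (0xAC150000, 0xAC15FFFF), (0xAC160000, 0xAC16FFFF),
   (0xAC170000, 0xAC17FFFF), (0xAC180000, 0xAC18FFFF), (0xAC190000, 0xAC19FFFF),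
   (0xAC1A0000, 0xAC1AFFFF), (0xAC1B0000, 0xAC1BFFFF), (0xAC1C0000, 0xAC1CFFFF),
   (0xAC1D0000, 0xAC1DFFFF), (0xAC1E0000, 0xAC1EFFFF), (0xAC1F0000, 0xAC1FFFFF),
   (0xC0A84100, 0xC0A841FF)]

def looks_like_docker_bridge_ip_py (hostname : String) : Bool :=
  match pvParseIPv4? hostname with
  | none => false
  | some v => pvDockerSubnets.any (fun sub => decide (sub.1 ≤ v ∧ v ≤ sub.2))

-- ===== PORT B =====
def pvDigVal (c : Char) : Int := (c.toNat : Int) - 48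

-- Source B's _octet: length-dispatched octet table
def pvOct? (p : List Char) : Option Int :=
  match p with
  | [c] => if pvDig c then some (pvDigVal c) else none
  | [c1, c2] =>
      if pvDig c1 && pvDig c2 && c1 != '0' then some (10 * pvDigVal c1 + pvDigVal c2)
      else none
  | [c1, c2, c3] =>
      if pvDig c1 && pvDig c2 && pvDig c3 && c1 != '0' then
        let n := 100 * pvDigVal c1 + 10 * pvDigVal c2 + pvDigVal c3
        if n ≤ 255 then some n else none
      else none
  | _ => none

def looks_like_docker_bridge_ip_py_alt (hostname : String) : Bool :=
  match hostname.toList.splitOn '.' with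
  | [p, q, r, s] =>
      match pvOct? p, pvOct? q, pvOct? r, pvOct? s with
      | some a, some b, some c, some _d =>
          decide ((a = 172 ∧ 17 ≤ b ∧ b ≤ 31) ∨ (a = 192 ∧ b = 168 ∧ c = 65))
      | _, _, _, _ => false
  | _ => false

-- ===== PRECONDITION & SPEC =====
def Spec_looks_like_docker_bridge_ip_py (hostname : String) (out : Bool) : Prop := out = looks_like_docker_bridge_ip_py_alt hostname
instance (hostname : String) (out : Bool) : Decidable (Spec_looks_like_docker_bridge_ip_py hostname out) := by unfold Spec_looks_like_docker_bridge_ip_py; infer_instance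

-- ===== CLAIM (what is proved, stated in full; the proofs are below) =====
def Claim_equal_looks_like_docker_bridge_ip_py : Prop := ∀ (hostname : String), Dom_looks_like_docker_bridge_ip_py hostname → Spec_looks_like_docker_bridge_ip_py hostname (looks_like_docker_bridge_ip_py hostname)

-- ===== LEMMAS AND PROOFS =====
-- A's octet validation and B's length-dispatched table agree on every character list.
theorem oct_eq (cs : List Char) : pvOctet? cs = pvOct? cs := by
  match cs with
  | [] => rfl
  | [c] =>
      simp [pvOctet?, pvOct?, pvDig]
      split_ifs <;> first | rfl | omega
  | [c1, c2] =>
      by_cases hz : c1 = '0'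
      · subst hz; simp [pvOctet?, pvOct?, pvDig]
      · simp [pvOctet?, pvOct?, pvDig, pvDigVal, hz]
        split_ifs <;> first | rfl | omega | (simp only [Option.some.injEq]; omega)
  | [c1, c2, c3] =>
      by_cases hz : c1 = '0'
      · subst hz; simp [pvOctet?, pvOct?, pvDig]
      · simp [pvOctet?, pvOct?, pvDig, pvDigVal, hz]
        split_ifs <;> first | rfl | omega | (simp only [Option.some.injEq]; omega)
  | c1 :: c2 :: c3 :: c4 :: t => simp [pvOctet?, pvOct?]

-- Every octet B accepts lies in [0, 255].
theorem oct_bounds (cs : List Char) (v : Int) (h : pvOct? cs = some v) :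
    0 ≤ v ∧ v ≤ 255 := by
  match cs with
  | [] => simp [pvOct?] at h
  | [c] =>
      simp [pvOct?, pvDig, pvDigVal] at h
      omega
  | [c1, c2] =>
      simp [pvOct?, pvDig, pvDigVal] at h
      obtain ⟨⟨h1, h2⟩, h3⟩ := h
      omega
  | [c1, c2, c3] =>
      simp [pvOct?, pvDig, pvDigVal] at h
      obtain ⟨⟨hd, -⟩, h4, h5⟩ := h
      omega
  | c1 :: c2 :: c3 :: c4 :: t => simp [pvOct?] at h

-- ===== VERDICT (by name: the statement is the Claim_ definition above) =====
theorem looks_like_docker_bridge_ip_py_spec : Claim_equal_looks_like_docker_bridge_ip_py := by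
  intro hostname _
  unfold Spec_looks_like_docker_bridge_ip_py looks_like_docker_bridge_ip_py
    looks_like_docker_bridge_ip_py_alt pvParseIPv4?
  rcases hs : hostname.toList.splitOn '.' with _ | ⟨p, _ | ⟨q, _ | ⟨r, _ | ⟨s, _ | ⟨t, ts⟩⟩⟩⟩⟩ <;>
    simp [List.map, oct_eq]
  cases hp : pvOct? p <;> cases hq : pvOct? q <;> cases hr : pvOct? r <;> cases hv : pvOct? s <;>
    simp
  rw [Bool.eq_iff_iff]
  obtain ⟨ha1, ha2⟩ := oct_bounds _ _ hp
  obtain ⟨hb1, hb2⟩ := oct_bounds _ _ hq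
  obtain ⟨hc1, hc2⟩ := oct_bounds _ _ hr
  obtain ⟨hd1, hd2⟩ := oct_bounds _ _ hv
  simp [pvDockerSubnets]
  omega
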